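-- pv_equiv track=rewrite | github.com/baxter-barlow/open-mmwave | tools/kicad_schematic_gen.py | _infer_sheet_from_nets
-- ===== SOURCE A (Python) =====
-- from typing import Dict, Iterable, List, Tuple
--
-- def _infer_sheet_from_nets(ref: str, nets: List[str]) -> str:
--     if ref == "U1":
--         return "pmic.kicad_sch"
--     if ref == "U2":
--         return "soc_core.kicad_sch"
--     if ref == "U3":
--         return "usb_uart.kicad_sch"
--     if ref == "U19":
--         return "power_input.kicad_sch"
--     if ref == "A1":
--         return "soc_core.kicad_sch"
--     if any(n.startswith("PMIC_") for n in nets):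
--         return "pmic.kicad_sch"
--     if any(n.startswith("USB_") for n in nets):
--         return "usb_uart.kicad_sch"
--     if any(n.startswith("HD_") for n in nets):
--         return "hd_connector.kicad_sch"
--     if any(n.startswith(("X48M_", "X32K_", "XIN32", "XOUT32")) for n in nets):
--         return "display_bt.kicad_sch"
--     if any(n.startswith("AR_") for n in nets):
--         return "soc_core.kicad_sch"
--     if any(n.startswith("BT_") or n.startswith("DISP") for n in nets):
--         return "display_bt.kicad_sch"
--     if any(n.endswith("NRST") or n.startswith("SOP") or n.startswith("RESET") for n in nets):
--         return "gpio_reset.kicad_sch"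
--     if ref.startswith("TP") or ref.startswith("SW"):
--         return "gpio_reset.kicad_sch"
--     return "misc.kicad_sch"
-- ===== SOURCE B (Python) =====
-- from typing import List
--
-- _REF_SHEETS = {
--     "U1": "pmic.kicad_sch",
--     "U2": "soc_core.kicad_sch",
--     "U3": "usb_uart.kicad_sch",
--     "U19": "power_input.kicad_sch",
--     "A1": "soc_core.kicad_sch",
-- }
--
-- _CAT_SHEETS = [
--     "pmic.kicad_sch",        # 0: PMIC_
--     "usb_uart.kicad_sch",    # 1: USB_
--     "hd_connector.kicad_sch",# 2: HD_
--     "display_bt.kicad_sch",  # 3: crystals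
--     "soc_core.kicad_sch",    # 4: AR_
--     "display_bt.kicad_sch",  # 5: BT_/DISP
--     "gpio_reset.kicad_sch",  # 6: NRST/SOP/RESET
-- ]
--
-- def _net_cat(n: str) -> int:
--     """Lowest-priority-index category this net belongs to (7 = none)."""
--     if n.startswith("PMIC_"):
--         return 0
--     if n.startswith("USB_"):
--         return 1
--     if n.startswith("HD_"):
--         return 2
--     if n.startswith(("X48M_", "X32K_", "XIN32", "XOUT32")):
--         return 3
--     if n.startswith("AR_"):
--         return 4
--     if n.startswith("BT_") or n.startswith("DISP"):
--         return 5
--     if n.endswith("NRST") or n.startswith("SOP") or n.startswith("RESET"):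
--         return 6
--     return 7
--
-- def _infer_sheet_from_nets(ref: str, nets: List[str]) -> str:
--     sheet = _REF_SHEETS.get(ref)
--     if sheet is not None:
--         return sheet
--     best = 7
--     for n in nets:
--         c = _net_cat(n)
--         if c < best:
--             best = c
--     if best < 7:
--         return _CAT_SHEETS[best]
--     if ref.startswith("TP") or ref.startswith("SW"):
--         return "gpio_reset.kicad_sch"
--     return "misc.kicad_sch"
-- ===== Notes on version B (the rewrite author's own statement) =====
-- stated objective: alternative
-- what changed: Replaces the five-way ref if-chain with a dict lookup and the seven successive scans of nets with a single pass computing the minimal matching category index per net, followed by a table lookup; the TP/SW ref fallback stays last.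
import Mathlib
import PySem

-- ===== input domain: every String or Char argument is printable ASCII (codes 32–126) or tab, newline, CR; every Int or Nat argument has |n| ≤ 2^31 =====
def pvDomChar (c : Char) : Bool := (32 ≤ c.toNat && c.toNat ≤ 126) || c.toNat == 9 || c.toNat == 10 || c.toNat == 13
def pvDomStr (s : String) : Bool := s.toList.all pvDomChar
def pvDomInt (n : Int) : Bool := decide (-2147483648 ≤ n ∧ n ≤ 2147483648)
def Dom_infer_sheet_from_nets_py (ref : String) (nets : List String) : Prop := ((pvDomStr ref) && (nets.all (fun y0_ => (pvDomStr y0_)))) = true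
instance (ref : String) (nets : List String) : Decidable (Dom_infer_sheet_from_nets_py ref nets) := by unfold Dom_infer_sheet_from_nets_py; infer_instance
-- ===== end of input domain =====

-- B replaces A's five-way ref if-chain by a dict lookup and A's seven successive
-- scans of nets by ONE pass computing the minimal matching category index, then a
-- table lookup (objective: alternative decomposition, same observable behaviour).

-- ===== PORT A =====
def infer_sheet_from_nets_py (ref : String) (nets : List String) : String :=
  if ref = "U1" then "pmic.kicad_sch"
  else if ref = "U2" then "soc_core.kicad_sch"
  else if ref = "U3" then "usb_uart.kicad_sch"
  else if ref = "U19" then "power_input.kicad_sch"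
  else if ref = "A1" then "soc_core.kicad_sch"
  else if nets.any (fun n => PySem.Str.startswith n "PMIC_") then "pmic.kicad_sch"
  else if nets.any (fun n => PySem.Str.startswith n "USB_") then "usb_uart.kicad_sch"
  else if nets.any (fun n => PySem.Str.startswith n "HD_") then "hd_connector.kicad_sch"
  else if nets.any (fun n => PySem.Str.startswith n "X48M_" || PySem.Str.startswith n "X32K_" ||
      PySem.Str.startswith n "XIN32" || PySem.Str.startswith n "XOUT32") then "display_bt.kicad_sch"
  else if nets.any (fun n => PySem.Str.startswith n "AR_") then "soc_core.kicad_sch"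
  else if nets.any (fun n => PySem.Str.startswith n "BT_" || PySem.Str.startswith n "DISP") then "display_bt.kicad_sch"
  else if nets.any (fun n => PySem.Str.endswith n "NRST" || PySem.Str.startswith n "SOP" ||
      PySem.Str.startswith n "RESET") then "gpio_reset.kicad_sch"
  else if PySem.Str.startswith ref "TP" || PySem.Str.startswith ref "SW" then "gpio_reset.kicad_sch"
  else "misc.kicad_sch"

-- ===== PORT B =====
def pvRefSheets : PySem.Dict String String := PySem.Dict.ofList
  [("U1", "pmic.kicad_sch"), ("U2", "soc_core.kicad_sch"), ("U3", "usb_uart.kicad_sch"),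
   ("U19", "power_input.kicad_sch"), ("A1", "soc_core.kicad_sch")]

def pvCatSheets : List String :=
  ["pmic.kicad_sch", "usb_uart.kicad_sch", "hd_connector.kicad_sch", "display_bt.kicad_sch",
   "soc_core.kicad_sch", "display_bt.kicad_sch", "gpio_reset.kicad_sch"]

def pvNetCat (n : String) : Nat :=
  if PySem.Str.startswith n "PMIC_" then 0
  else if PySem.Str.startswith n "USB_" then 1
  else if PySem.Str.startswith n "HD_" then 2
  else if PySem.Str.startswith n "X48M_" || PySem.Str.startswith n "X32K_" ||
      PySem.Str.startswith n "XIN32" || PySem.Str.startswith n "XOUT32" then 3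
  else if PySem.Str.startswith n "AR_" then 4
  else if PySem.Str.startswith n "BT_" || PySem.Str.startswith n "DISP" then 5
  else if PySem.Str.endswith n "NRST" || PySem.Str.startswith n "SOP" ||
      PySem.Str.startswith n "RESET" then 6
  else 7

def infer_sheet_from_nets_py_alt (ref : String) (nets : List String) : String :=
  match pvRefSheets.get? ref with
  | some s => s
  | none =>
    let best := nets.foldl (fun b n => let c := pvNetCat n; if c < b then c else b) 7
    if best < 7 then
      -- best < 7 = pvCatSheets.length, so this is exactly Python's _CAT_SHEETS[best]
      pvCatSheets.getD best ""
    else if PySem.Str.startswith ref "TP" || PySem.Str.startswith ref "SW" then "gpio_reset.kicad_sch"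
    else "misc.kicad_sch"

-- ===== PRECONDITION & SPEC =====
def Spec_infer_sheet_from_nets_py (ref : String) (nets : List String) (out : String) : Prop := out = infer_sheet_from_nets_py_alt ref nets
instance (ref : String) (nets : List String) (out : String) : Decidable (Spec_infer_sheet_from_nets_py ref nets out) := by unfold Spec_infer_sheet_from_nets_py; infer_instance

-- ===== CLAIM (what is proved, stated in full; the proofs are below) =====
def Claim_equal_infer_sheet_from_nets_py : Prop := ∀ (ref : String) (nets : List String), Dom_infer_sheet_from_nets_py ref nets → Spec_infer_sheet_from_nets_py ref nets (infer_sheet_from_nets_py ref nets)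

-- ===== LEMMAS AND PROOFS =====

-- the per-category membership tests, indexed by priority
def pvP : Nat → String → Bool
  | 0, n => PySem.Str.startswith n "PMIC_"
  | 1, n => PySem.Str.startswith n "USB_"
  | 2, n => PySem.Str.startswith n "HD_"
  | 3, n => PySem.Str.startswith n "X48M_" || PySem.Str.startswith n "X32K_" ||
      PySem.Str.startswith n "XIN32" || PySem.Str.startswith n "XOUT32"
  | 4, n => PySem.Str.startswith n "AR_"
  | 5, n => PySem.Str.startswith n "BT_" || PySem.Str.startswith n "DISP"
  | 6, n => PySem.Str.endswith n "NRST" || PySem.Str.startswith n "SOP" ||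
      PySem.Str.startswith n "RESET"
  | _, _ => false

theorem pvNetCat_le_of_pvP (k : Nat) (n : String) (h : pvP k n = true) : pvNetCat n ≤ k := by
  match k with
  | 0 | 1 | 2 | 3 | 4 | 5 | 6 =>
    simp only [pvP] at h
    unfold pvNetCat
    split_ifs <;> simp_all
  | (m + 7) => simp [pvP] at h

theorem pvNetCat_cases (n : String) :
    pvNetCat n = 7 ∨ (pvNetCat n ≤ 6 ∧ pvP (pvNetCat n) n = true) := by
  unfold pvNetCat
  split_ifs <;> simp_all [pvP]

theorem pvFold_spec (nets : List String) (b : Nat) :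
    (nets.foldl (fun b n => let c := pvNetCat n; if c < b then c else b) b = b ∨
      ∃ n ∈ nets, nets.foldl (fun b n => let c := pvNetCat n; if c < b then c else b) b = pvNetCat n) ∧
    nets.foldl (fun b n => let c := pvNetCat n; if c < b then c else b) b ≤ b ∧
    ∀ n ∈ nets, nets.foldl (fun b n => let c := pvNetCat n; if c < b then c else b) b ≤ pvNetCat n := by
  induction nets generalizing b with
  | nil => simp
  | cons x xs ih =>
    simp only [List.foldl_cons]
    obtain ⟨hach, hle, hmin⟩ := ih (if pvNetCat x < b then pvNetCat x else b)
    refine ⟨?_, ?_, ?_⟩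
    · rcases hach with h | ⟨n, hn, h⟩
      · rw [h]; split_ifs with hx
        · exact Or.inr ⟨x, by simp, rfl⟩
        · exact Or.inl rfl
      · exact Or.inr ⟨n, by simp [hn], h⟩
    · refine le_trans hle ?_; split_ifs <;> omega
    · intro n hn
      rcases List.mem_cons.mp hn with rfl | hn
      · refine le_trans hle ?_; split_ifs <;> omega
      · exact hmin n hn

theorem pvRefSheets_get? (r : String) :
    pvRefSheets.get? r =
      if r = "U1" then some "pmic.kicad_sch"
      else if r = "U2" then some "soc_core.kicad_sch"
      else if r = "U3" then some "usb_uart.kicad_sch"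
      else if r = "U19" then some "power_input.kicad_sch"
      else if r = "A1" then some "soc_core.kicad_sch"
      else none := by
  have h : pvRefSheets = PySem.Dict.mk
      [("U1", "pmic.kicad_sch"), ("U2", "soc_core.kicad_sch"), ("U3", "usb_uart.kicad_sch"),
       ("U19", "power_input.kicad_sch"), ("A1", "soc_core.kicad_sch")] := by decide
  rw [h]
  simp only [PySem.Dict.get?_mk_cons, beq_iff_eq]
  have e : (PySem.Dict.mk ([] : List (String × String))).get? r = none := by
    simp [PySem.Dict.get?]
  rw [e]
  simp only [@eq_comm String r "U1", @eq_comm String r "U2", @eq_comm String r "U3",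
    @eq_comm String r "U19", @eq_comm String r "A1"]

-- the heart of the equivalence: A's seven successive any-scans agree with B's
-- single minimal-category pass followed by the table lookup
theorem pv_net_part (ref : String) (nets : List String) :
    (if nets.any (fun n => pvP 0 n) then "pmic.kicad_sch"
     else if nets.any (fun n => pvP 1 n) then "usb_uart.kicad_sch"
     else if nets.any (fun n => pvP 2 n) then "hd_connector.kicad_sch"
     else if nets.any (fun n => pvP 3 n) then "display_bt.kicad_sch"
     else if nets.any (fun n => pvP 4 n) then "soc_core.kicad_sch"
     else if nets.any (fun n => pvP 5 n) then "display_bt.kicad_sch"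
     else if nets.any (fun n => pvP 6 n) then "gpio_reset.kicad_sch"
     else if PySem.Str.startswith ref "TP" || PySem.Str.startswith ref "SW" then "gpio_reset.kicad_sch"
     else "misc.kicad_sch") =
    (let best := nets.foldl (fun b n => let c := pvNetCat n; if c < b then c else b) 7
     if best < 7 then pvCatSheets.getD best ""
     else if PySem.Str.startswith ref "TP" || PySem.Str.startswith ref "SW" then "gpio_reset.kicad_sch"
     else "misc.kicad_sch") := by
  obtain ⟨hach, hle, hmin⟩ := pvFold_spec nets 7
  set m := nets.foldl (fun b n => let c := pvNetCat n; if c < b then c else b) 7 with hm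
  have hach' : m < 7 → ∃ n ∈ nets, m = pvNetCat n := by
    intro hlt
    rcases hach with h | h
    · omega
    · exact h
  -- if every test up to k is false on every net, then m is not below … (used per case)
  have key : ∀ k : Nat, k ≤ 6 → (∃ n ∈ nets, pvP k n = true) →
      (∀ j : Nat, j < k → ∀ n ∈ nets, ¬ pvP j n = true) → m = k := by
    intro k hk ⟨n, hn, hpn⟩ hbelow
    have h1 : m ≤ k := le_trans (hmin n hn) (pvNetCat_le_of_pvP k n hpn)
    rcases Nat.lt_or_ge m k with hlt | hge
    · obtain ⟨n', hn', hcat⟩ := hach' (by omega)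
      rcases pvNetCat_cases n' with h7 | ⟨_, hp⟩
      · omega
      · rw [← hcat] at hp
        exact absurd hp (hbelow m hlt n' hn')
    · omega
  by_cases h0 : nets.any (fun n => pvP 0 n)
  · obtain ⟨n, hn, hp⟩ := List.any_eq_true.mp h0
    have : m = 0 := key 0 (by omega) ⟨n, hn, hp⟩ (by omega)
    simp [h0, this, pvCatSheets]
  · by_cases h1 : nets.any (fun n => pvP 1 n)
    · obtain ⟨n, hn, hp⟩ := List.any_eq_true.mp h1
      have : m = 1 := by
        refine key 1 (by omega) ⟨n, hn, hp⟩ ?_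
        intro j hj n' hn'
        interval_cases j
        exact (List.any_eq_false.mp (by simpa using h0)) n' hn'
      simp [h0, h1, this, pvCatSheets]
    · by_cases h2 : nets.any (fun n => pvP 2 n)
      · obtain ⟨n, hn, hp⟩ := List.any_eq_true.mp h2
        have : m = 2 := by
          refine key 2 (by omega) ⟨n, hn, hp⟩ ?_
          intro j hj n' hn'
          interval_cases j
          · exact (List.any_eq_false.mp (by simpa using h0)) n' hn'
          · exact (List.any_eq_false.mp (by simpa using h1)) n' hn'
        simp [h0, h1, h2, this, pvCatSheets]
      · by_cases h3 : nets.any (fun n => pvP 3 n)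
        · obtain ⟨n, hn, hp⟩ := List.any_eq_true.mp h3
          have : m = 3 := by
            refine key 3 (by omega) ⟨n, hn, hp⟩ ?_
            intro j hj n' hn'
            interval_cases j
            · exact (List.any_eq_false.mp (by simpa using h0)) n' hn'
            · exact (List.any_eq_false.mp (by simpa using h1)) n' hn'
            · exact (List.any_eq_false.mp (by simpa using h2)) n' hn'
          simp [h0, h1, h2, h3, this, pvCatSheets]
        · by_cases h4 : nets.any (fun n => pvP 4 n)
          · obtain ⟨n, hn, hp⟩ := List.any_eq_true.mp h4
            have : m = 4 := by
              refine key 4 (by omega) ⟨n, hn, hp⟩ ?_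
              intro j hj n' hn'
              interval_cases j
              · exact (List.any_eq_false.mp (by simpa using h0)) n' hn'
              · exact (List.any_eq_false.mp (by simpa using h1)) n' hn'
              · exact (List.any_eq_false.mp (by simpa using h2)) n' hn'
              · exact (List.any_eq_false.mp (by simpa using h3)) n' hn'
            simp [h0, h1, h2, h3, h4, this, pvCatSheets]
          · by_cases h5 : nets.any (fun n => pvP 5 n)
            · obtain ⟨n, hn, hp⟩ := List.any_eq_true.mp h5
              have : m = 5 := by
                refine key 5 (by omega) ⟨n, hn, hp⟩ ?_
                intro j hj n' hn'
                interval_cases j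
                · exact (List.any_eq_false.mp (by simpa using h0)) n' hn'
                · exact (List.any_eq_false.mp (by simpa using h1)) n' hn'
                · exact (List.any_eq_false.mp (by simpa using h2)) n' hn'
                · exact (List.any_eq_false.mp (by simpa using h3)) n' hn'
                · exact (List.any_eq_false.mp (by simpa using h4)) n' hn'
              simp [h0, h1, h2, h3, h4, h5, this, pvCatSheets]
            · by_cases h6 : nets.any (fun n => pvP 6 n)
              · obtain ⟨n, hn, hp⟩ := List.any_eq_true.mp h6
                have : m = 6 := by
                  refine key 6 (by omega) ⟨n, hn, hp⟩ ?_
                  intro j hj n' hn'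
                  interval_cases j
                  · exact (List.any_eq_false.mp (by simpa using h0)) n' hn'
                  · exact (List.any_eq_false.mp (by simpa using h1)) n' hn'
                  · exact (List.any_eq_false.mp (by simpa using h2)) n' hn'
                  · exact (List.any_eq_false.mp (by simpa using h3)) n' hn'
                  · exact (List.any_eq_false.mp (by simpa using h4)) n' hn'
                  · exact (List.any_eq_false.mp (by simpa using h5)) n' hn'
                simp [h0, h1, h2, h3, h4, h5, h6, this, pvCatSheets]
              · have hm7 : m = 7 := by
                  rcases hach with h | ⟨n, hn, h⟩
                  · exact h
                  · rcases pvNetCat_cases n with h7 | ⟨hle6, hp⟩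
                    · omega
                    · exfalso
                      have hany : nets.any (fun x => pvP (pvNetCat n) x) = true :=
                        List.any_eq_true.mpr ⟨n, hn, hp⟩
                      interval_cases hcn : (pvNetCat n) <;> simp_all
                simp [h0, h1, h2, h3, h4, h5, h6, hm7]

-- ===== VERDICT (by name: the statement is the Claim_ definition above) =====
theorem infer_sheet_from_nets_py_spec : Claim_equal_infer_sheet_from_nets_py := by
  intro ref nets _
  unfold Spec_infer_sheet_from_nets_py infer_sheet_from_nets_py infer_sheet_from_nets_py_alt
  rw [pvRefSheets_get?]
  by_cases hr1 : ref = "U1"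
  · simp [hr1]
  · by_cases hr2 : ref = "U2"
    · simp [hr2]
    · by_cases hr3 : ref = "U3"
      · simp [hr3]
      · by_cases hr4 : ref = "U19"
        · simp [hr4]
        · by_cases hr5 : ref = "A1"
          · simp [hr5]
          · simp only [hr1, hr2, hr3, hr4, hr5, if_false]
            simpa [pvP] using pv_net_part ref nets
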